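-- pv_equiv track=rewrite | github.com/olliesaull/statement-processor | service/pricing_config.py | calculate_total_pence
-- ===== SOURCE A (Python) =====
-- GRADUATED_TIERS: list[tuple[int | None, int]] = [(499, 10), (500, 9), (None, 8)]
--
-- def calculate_total_pence(token_count: int) -> int:
--     """Calculate the total price in pence for a graduated token purchase.
--
--     Args:
--         token_count: Number of tokens to price.
--
--     Returns:
--         Total price in pence (integer — no fractional pence).
--     """
--     total = 0
--     remaining = token_count
--     for up_to, rate_pence in GRADUATED_TIERS:
--         if up_to is None:
--             # Final tier: absorbs all remaining tokens.
--             total += remaining * rate_pence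
--             remaining = 0
--         else:
--             chunk = min(remaining, up_to)
--             total += chunk * rate_pence
--             remaining -= chunk
--         if remaining <= 0:
--             break
--     return total
-- ===== SOURCE B (Python) =====
-- def calculate_total_pence(token_count: int) -> int:
--     # Closed-form graduated pricing: pick the bracket directly.
--     # Tier 1 covers tokens 1..499 at 10p (cumulative 4990),
--     # tier 2 covers 500..999 at 9p (cumulative +4500), rest at 8p.
--     if token_count <= 499:
--         return token_count * 10
--     if token_count <= 999:
--         return 4990 + (token_count - 499) * 9
--     return 9490 + (token_count - 999) * 8
-- ===== Notes on version B (the rewrite author's own statement) =====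
-- stated objective: simpler
-- what changed: Replaced the tier loop with accumulator/remaining bookkeeping by a direct piecewise closed form selecting the bracket with two comparisons.
import Mathlib
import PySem

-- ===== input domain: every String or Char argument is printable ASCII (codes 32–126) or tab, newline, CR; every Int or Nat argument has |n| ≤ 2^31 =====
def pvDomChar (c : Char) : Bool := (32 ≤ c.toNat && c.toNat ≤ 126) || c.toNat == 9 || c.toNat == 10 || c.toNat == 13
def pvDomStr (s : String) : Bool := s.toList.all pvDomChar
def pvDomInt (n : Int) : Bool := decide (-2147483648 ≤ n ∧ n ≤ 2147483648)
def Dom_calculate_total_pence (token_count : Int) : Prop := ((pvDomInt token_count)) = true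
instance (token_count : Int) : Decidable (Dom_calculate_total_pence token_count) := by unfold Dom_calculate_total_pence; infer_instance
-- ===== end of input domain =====

-- B replaces the tier loop by a piecewise closed form; equivalence of return values is proved.
-- ===== PORT A =====
def GRADUATED_TIERS : List (Option Int × Int) := [(some 499, 10), (some 500, 9), (none, 8)]

def calculate_total_pence (token_count : Int) : Int :=
  -- total, remaining, broken-out-of-loop flag
  (GRADUATED_TIERS.foldl
    (fun (st : Int × Int × Bool) (t : Option Int × Int) =>
      if st.2.2 then st
      else
        match t.1 with
        | none =>
            let total := st.1 + st.2.1 * t.2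
            let remaining : Int := 0
            (total, remaining, decide (remaining ≤ 0))
        | some up_to =>
            let chunk := min st.2.1 up_to
            let total := st.1 + chunk * t.2
            let remaining := st.2.1 - chunk
            (total, remaining, decide (remaining ≤ 0)))
    (0, token_count, false)).1

-- ===== PORT B =====
def calculate_total_pence_alt (token_count : Int) : Int :=
  if token_count ≤ 499 then token_count * 10
  else if token_count ≤ 999 then 4990 + (token_count - 499) * 9
  else 9490 + (token_count - 999) * 8

-- ===== PRECONDITION & SPEC =====
def Spec_calculate_total_pence (token_count : Int) (out : Int) : Prop := out = calculate_total_pence_alt token_count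
instance (token_count : Int) (out : Int) : Decidable (Spec_calculate_total_pence token_count out) := by unfold Spec_calculate_total_pence; infer_instance

-- ===== CLAIM (what is proved, stated in full; the proofs are below) =====
def Claim_equal_calculate_total_pence : Prop := ∀ (token_count : Int), Dom_calculate_total_pence token_count → Spec_calculate_total_pence token_count (calculate_total_pence token_count)

-- ===== LEMMAS AND PROOFS =====

-- ===== VERDICT (by name: the statement is the Claim_ definition above) =====
theorem calculate_total_pence_spec : Claim_equal_calculate_total_pence := by
  intro tc _
  unfold Spec_calculate_total_pence calculate_total_pence calculate_total_pence_alt GRADUATED_TIERS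
  simp only [List.foldl, min_def]
  split_ifs <;> simp_all <;> omega
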